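-- pv_equiv track=rewrite | github.com/clusterfudge/heare-developer | heare/developer/tools/tmux_session.py | _manual_quote_check
-- ===== SOURCE A (Python) =====
-- def _manual_quote_check(command: str) -> bool:
--     """Manual quote balance check for edge cases."""
--     single_quotes = 0
--     double_quotes = 0
--     i = 0
--
--     while i < len(command):
--         char = command[i]
--
--         if char == "'" and (i == 0 or command[i - 1] != "\\"):
--             single_quotes += 1
--         elif char == '"' and (i == 0 or command[i - 1] != "\\"):
--             double_quotes += 1
--
--         i += 1
--
--     # For our purposes, we consider quotes balanced if they appear in pairs
--     # or if we have shell-style quote structures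
--     return single_quotes % 2 == 0 and double_quotes % 2 == 0
-- ===== SOURCE B (Python) =====
-- def _manual_quote_check(command: str) -> bool:
--     """Manual quote balance check for edge cases."""
--     # Total quotes minus escaped quotes (a quote whose immediately preceding
--     # character is a backslash), via whole-string counts and a zip with the
--     # shifted string -- no indexed scan and no per-character escape state.
--     chars = list(command)
--     escaped = [b for a, b in zip(chars, chars[1:]) if a == "\\"]
--     singles = chars.count("'") - escaped.count("'")
--     doubles = chars.count('"') - escaped.count('"')
--     return singles % 2 == 0 and doubles % 2 == 0
-- ===== Notes on version B (the rewrite author's own statement) =====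
-- stated objective: alternative
-- what changed: Replaces A's stateful indexed scan with stateless whole-list arithmetic: count all quotes, count escaped quotes via a zip of the string with its shift, subtract, and test parity.
import Mathlib
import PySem

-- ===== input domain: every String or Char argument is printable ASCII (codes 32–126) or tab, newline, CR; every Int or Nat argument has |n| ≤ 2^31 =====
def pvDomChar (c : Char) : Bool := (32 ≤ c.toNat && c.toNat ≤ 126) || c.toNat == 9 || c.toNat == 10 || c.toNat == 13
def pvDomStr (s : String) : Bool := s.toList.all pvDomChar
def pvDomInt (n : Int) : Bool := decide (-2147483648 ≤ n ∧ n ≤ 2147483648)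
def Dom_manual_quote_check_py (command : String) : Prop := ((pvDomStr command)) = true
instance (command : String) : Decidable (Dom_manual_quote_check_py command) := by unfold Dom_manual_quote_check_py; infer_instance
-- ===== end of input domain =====

-- B replaces A's stateful indexed scan with stateless whole-list arithmetic:
-- total quote count minus escaped-quote count (escaped = preceded by backslash,
-- found via a zip of the character list with its shift), then the parity test.

-- ===== PORT A =====
-- A's while loop: walk index i, count unescaped single/double quotes, test parity at the end.
def manualQuoteLoopA (cs : List Char) (i : Nat) (s d : Int) : Bool :=
  if h : i < cs.length then
    let c := cs[i]
    if c = '\'' ∧ (i = 0 ∨ cs[i - 1]! ≠ '\\') then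
      manualQuoteLoopA cs (i + 1) (s + 1) d
    else if c = '"' ∧ (i = 0 ∨ cs[i - 1]! ≠ '\\') then
      manualQuoteLoopA cs (i + 1) s (d + 1)
    else
      manualQuoteLoopA cs (i + 1) s d
  else
    (s % 2 == 0) && (d % 2 == 0)
termination_by cs.length - i

def manual_quote_check_py (command : String) : Bool :=
  manualQuoteLoopA command.toList 0 0 0

-- ===== PORT B =====
-- Source B: chars = list(command); escaped = [b for a, b in zip(chars, chars[1:]) if a == "\\"];
-- singles/doubles = total count - escaped count; parity of both.
def manual_quote_check_py_alt (command : String) : Bool :=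
  let chars := command.toList
  let escaped := ((chars.zip (PySem.List.slice chars (some 1) none)).filter
      (fun p => p.1 == '\\')).map (fun p => p.2)
  let singles : Int := (PySem.List.count chars '\'' : Int) - (PySem.List.count escaped '\'' : Int)
  let doubles : Int := (PySem.List.count chars '"' : Int) - (PySem.List.count escaped '"' : Int)
  (singles % 2 == 0) && (doubles % 2 == 0)

-- ===== PRECONDITION & SPEC =====
def Spec_manual_quote_check_py (command : String) (out : Bool) : Prop := out = manual_quote_check_py_alt command
instance (command : String) (out : Bool) : Decidable (Spec_manual_quote_check_py command out) := by unfold Spec_manual_quote_check_py; infer_instance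

-- ===== CLAIM (what is proved, stated in full; the proofs are below) =====
def Claim_equal_manual_quote_check_py : Prop := ∀ (command : String), Dom_manual_quote_check_py command → Spec_manual_quote_check_py command (manual_quote_check_py command)

-- ===== LEMMAS AND PROOFS =====

-- Number of occurrences of c in l that are NOT preceded by a backslash, with p? the
-- character just before the head of l (none at the very start of the string).
def ucount (p? : Option Char) (c : Char) (l : List Char) : Int :=
  match l with
  | [] => 0
  | x :: xs => (if x = c ∧ p? ≠ some '\\' then 1 else 0) + ucount (some x) c xs

-- B's escaped-character list for suffix cs whose previous character is p.
def escOf (l : List Char) : List Char :=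
  ((l.zip l.tail).filter (fun p => p.1 == '\\')).map (fun p => p.2)

theorem escOf_cons (p x : Char) (xs : List Char) :
    escOf (p :: x :: xs) = (if p = '\\' then [x] else []) ++ escOf (x :: xs) := by
  simp only [escOf, List.tail_cons, List.zip_cons_cons, List.filter_cons]
  by_cases hp : p = '\\' <;> simp [hp]

-- B-side characterisation: count minus escaped-count IS the unescaped count.
theorem ucount_eq_sub (c p : Char) (cs : List Char) :
    ucount (some p) c cs = (cs.count c : Int) - ((escOf (p :: cs)).count c : Int) := by
  induction cs generalizing p with
  | nil => simp [ucount, escOf]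
  | cons x xs ih =>
    rw [escOf_cons, ucount, ih x]
    by_cases hp : p = '\\' <;> by_cases hx : x = c <;> simp [hp, hx] <;> omega

-- A-side invariant: A's loop resumed at index |pre| with counters s, d tests the
-- parity of s, d plus the unescaped counts over the remaining suffix.
theorem manualQuote_key (suf pre : List Char) (s d : Int) :
    manualQuoteLoopA (pre ++ suf) pre.length s d =
      (((s + ucount pre.getLast? '\'' suf) % 2 == 0) &&
       ((d + ucount pre.getLast? '"' suf) % 2 == 0)) := by
  induction suf generalizing pre s d with
  | nil => rw [manualQuoteLoopA.eq_def]; simp [ucount]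
  | cons c rest ih =>
    have hlen : pre.length < (pre ++ c :: rest).length := by simp
    have hprev : ((pre.length = 0 ∨ (pre ++ c :: rest)[pre.length - 1]! ≠ '\\')) ↔
        pre.getLast? ≠ some '\\' := by
      rcases List.eq_nil_or_concat pre with h | ⟨l', a, h⟩
      · subst h; simp
      · subst h
        simp only [List.concat_eq_append]
        have hg : (l' ++ [a] ++ (c :: rest))[(l' ++ [a]).length - 1]! = a := by simp
        rw [hg]
        simp
    have ihc := ih (pre ++ [c])
    simp only [List.append_assoc, List.singleton_append, List.length_append,
      List.length_cons, List.length_nil, List.getLast?_concat] at ihc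
    rw [manualQuoteLoopA.eq_def]
    simp only [dif_pos hlen]
    have hget : (pre ++ c :: rest)[pre.length]'hlen = c := by simp
    simp only [hget]
    by_cases hp : pre.getLast? = some '\\'
    · have hE : ¬ (pre.length = 0 ∨ (pre ++ c :: rest)[pre.length - 1]! ≠ '\\') := by
        rw [hprev]; simp [hp]
      rw [if_neg (by tauto), if_neg (by tauto), ihc (s := s) (d := d)]
      simp [ucount, hp]
    · have hE : (pre.length = 0 ∨ (pre ++ c :: rest)[pre.length - 1]! ≠ '\\') := by
        rw [hprev]; exact hp
      by_cases hc1 : c = '\''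
      · rw [if_pos ⟨hc1, hE⟩, ihc (s := s + 1) (d := d)]
        have h1 : s + 1 + ucount (some c) '\'' rest = s + ucount pre.getLast? '\'' (c :: rest) := by
          simp [ucount, hc1, hp]; ring
        have h2 : d + ucount (some c) '"' rest = d + ucount pre.getLast? '"' (c :: rest) := by
          simp [ucount, hc1, hp]
        rw [h1, h2]
      · by_cases hc2 : c = '"'
        · rw [if_neg (by tauto), if_pos ⟨hc2, hE⟩, ihc (s := s) (d := d + 1)]
          have h1 : s + ucount (some c) '\'' rest = s + ucount pre.getLast? '\'' (c :: rest) := by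
            simp [ucount, hc2, hp]
          have h2 : d + 1 + ucount (some c) '"' rest = d + ucount pre.getLast? '"' (c :: rest) := by
            simp [ucount, hc2, hp]; ring
          rw [h1, h2]
        · rw [if_neg (by tauto), if_neg (by tauto), ihc (s := s) (d := d)]
          simp [ucount, hc1, hc2, hp]

-- Top level: ucount from the start of the string equals B's count difference.
theorem ucount_none_eq (c : Char) (cs : List Char) :
    ucount none c cs = (cs.count c : Int) - ((escOf cs).count c : Int) := by
  cases cs with
  | nil => simp [ucount, escOf]
  | cons x xs =>
    rw [ucount, ucount_eq_sub c x xs, List.count_cons]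
    by_cases hx : x = c <;> simp [hx] <;> omega

-- ===== VERDICT (by name: the statement is the Claim_ definition above) =====
theorem manual_quote_check_py_spec : Claim_equal_manual_quote_check_py := by
  intro command _
  show manual_quote_check_py command = manual_quote_check_py_alt command
  have h := manualQuote_key command.toList [] 0 0
  simp only [List.nil_append, List.length_nil, List.getLast?_nil, Int.zero_add] at h
  rw [manual_quote_check_py, h, manual_quote_check_py_alt]
  simp [PySem.List.slice_from, PySem.List.count, escOf, ucount_none_eq,
    List.drop_one]
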